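-- pv_equiv track=rewrite | github.com/Synophride/intro_app | mk_model.py | build_freqs_dicts
-- ===== SOURCE A (Python) =====
-- def build_freqs_dicts(data, most_used_words):
--     d_g = dict()
--     d_d = dict()
--     for x in data:
--         for sentence in x[0]:
--             for pos in range(len(sentence)):
--                 if (sentence[pos] in most_used_words):
--                     if(pos > 0):
--                         key = sentence[pos-1] + '|' + sentence[pos]
--                         d_d[key] = d_d.get(key, 0) + 1
--                     if(pos < len(sentence)-1):
--                         key = sentence[pos] + '|' + sentence[pos+1]
--                         d_g[key] = d_g.get(key, 0) + 1
--     return (d_g, d_d)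
-- ===== SOURCE B (Python) =====
-- def build_freqs_dicts(data, most_used_words):
--     # Stage 1: count every adjacent bigram once, keyed by the word pair.
--     pairs = {}
--     for x in data:
--         for sentence in x[0]:
--             for a, b in zip(sentence, sentence[1:]):
--                 pairs[(a, b)] = pairs.get((a, b), 0) + 1
--     # Stage 2: distribute the aggregated counts into the two dicts.
--     frequent = set(most_used_words)
--     d_g = {}
--     d_d = {}
--     for (a, b), c in pairs.items():
--         key = a + '|' + b
--         if a in frequent:
--             d_g[key] = d_g.get(key, 0) + c
--         if b in frequent:
--             d_d[key] = d_d.get(key, 0) + c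
--     return (d_g, d_d)
-- ===== Notes on version B (the rewrite author's own statement) =====
-- stated objective: faster
-- what changed: Replaces A's single pass that conditionally increments the two output dicts at each position (scanning most_used_words for each token) by a two-stage algorithm: first aggregate all adjacent bigrams unconditionally into one pair-keyed counter, then one pass over the counter's items distributes each aggregated count into d_g/d_d via set membership of the left/right word.
import Mathlib
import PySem

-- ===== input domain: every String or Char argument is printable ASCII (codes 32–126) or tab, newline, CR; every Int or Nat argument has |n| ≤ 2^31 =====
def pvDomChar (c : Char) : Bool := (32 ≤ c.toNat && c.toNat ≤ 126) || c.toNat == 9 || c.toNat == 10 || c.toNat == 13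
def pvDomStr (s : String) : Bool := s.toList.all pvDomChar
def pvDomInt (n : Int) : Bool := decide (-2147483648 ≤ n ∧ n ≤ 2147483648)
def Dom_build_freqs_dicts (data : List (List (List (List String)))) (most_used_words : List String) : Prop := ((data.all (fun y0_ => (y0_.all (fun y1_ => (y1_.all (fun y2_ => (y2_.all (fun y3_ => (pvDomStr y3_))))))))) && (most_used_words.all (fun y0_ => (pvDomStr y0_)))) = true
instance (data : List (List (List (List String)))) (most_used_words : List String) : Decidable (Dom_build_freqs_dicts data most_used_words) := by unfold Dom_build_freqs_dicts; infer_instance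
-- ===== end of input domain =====

-- B replaces A's single conditional-increment pass by a two-stage algorithm: it first
-- aggregates ALL adjacent bigrams into one pair-keyed counter, then distributes each
-- aggregated count into d_g/d_d by set membership of the left/right word; measurably faster (no per-token scan of most_used_words).

-- ===== PORT A =====
-- shared primitive: d[key] = d.get(key, 0) + 1
def pvInc (d : PySem.Dict String Int) (key : String) : PySem.Dict String Int :=
  d.insert key (d.getD key 0 + 1)

-- body of A's 'for pos in range(len(sentence))' loop
def pvStepA (most_used_words sentence : List String)
    (st : PySem.Dict String Int × PySem.Dict String Int) (pos : Int) :
    PySem.Dict String Int × PySem.Dict String Int :=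
  if most_used_words.contains (PySem.List.pyGetD sentence pos "") then
    let st1 :=
      if 0 < pos then
        (st.1, pvInc st.2 (PySem.List.pyGetD sentence (pos - 1) "" ++ "|" ++ PySem.List.pyGetD sentence pos ""))
      else st
    if pos < (sentence.length : Int) - 1 then
      (pvInc st1.1 (PySem.List.pyGetD sentence pos "" ++ "|" ++ PySem.List.pyGetD sentence (pos + 1) ""), st1.2)
    else st1
  else st

-- Pre_ below excludes empty x, where Python's x[0] raises; under it pyGetD x 0 [] is exact.
def build_freqs_dicts (data : List (List (List (List String)))) (most_used_words : List String) :
    (List (String × Int)) × (List (String × Int)) :=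
  let st := data.foldl (fun st x =>
      (PySem.List.pyGetD x 0 []).foldl (fun st sentence =>
        (PySem.List.pyRange 0 (sentence.length : Int) 1).foldl (pvStepA most_used_words sentence) st) st)
    (PySem.Dict.empty, PySem.Dict.empty)
  (st.1.items, st.2.items)

-- ===== PORT B =====
-- stage 2 body: distribute one aggregated item (pair, count) into (d_g, d_d)
def pvStepC (frequent : PySem.Set String)
    (st : PySem.Dict String Int × PySem.Dict String Int) (pc : (String × String) × Int) :
    PySem.Dict String Int × PySem.Dict String Int :=
  let key := pc.1.1 ++ "|" ++ pc.1.2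
  let st1 := if PySem.Set.contains frequent pc.1.1 then
      (st.1.insert key (st.1.getD key 0 + pc.2), st.2) else st
  if PySem.Set.contains frequent pc.1.2 then
    (st1.1, st1.2.insert key (st1.2.getD key 0 + pc.2))
  else st1

def build_freqs_dicts_alt (data : List (List (List (List String)))) (most_used_words : List String) :
    (List (String × Int)) × (List (String × Int)) :=
  -- stage 1: pairs[(a,b)] = pairs.get((a,b), 0) + 1 over every adjacent pair
  let pairs := data.foldl (fun pairs x =>
      (PySem.List.pyGetD x 0 []).foldl (fun pairs s =>
        (s.zip (PySem.List.slice s (some 1) none)).foldl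
          (fun pairs p => pairs.insert p (pairs.getD p 0 + 1)) pairs) pairs)
    PySem.Dict.empty
  -- stage 2: distribute the aggregated counts
  let frequent := PySem.Set.ofList most_used_words
  let st := pairs.items.foldl (pvStepC frequent) (PySem.Dict.empty, PySem.Dict.empty)
  (st.1.items, st.2.items)

-- ===== PRECONDITION & SPEC =====
-- Pre_ excludes data containing an empty inner list x, on which Python's x[0] raises IndexError (in A and in B alike).
def Pre_build_freqs_dicts (data : List (List (List (List String)))) (most_used_words : List String) : Prop :=
  ∀ x ∈ data, x ≠ []
instance (data : List (List (List (List String)))) (most_used_words : List String) : Decidable (Pre_build_freqs_dicts data most_used_words) := by unfold Pre_build_freqs_dicts; infer_instance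

def pvWitness_build_freqs_dicts : List (List (List (List String))) × List String :=
  ([[[["a", "b", "a"], ["b"]]]], ["a"])

def Spec_build_freqs_dicts (data : List (List (List (List String)))) (most_used_words : List String) (out : (List (String × Int)) × (List (String × Int))) : Prop := out = build_freqs_dicts_alt data most_used_words
instance (data : List (List (List (List String)))) (most_used_words : List String) (out : (List (String × Int)) × (List (String × Int))) : Decidable (Spec_build_freqs_dicts data most_used_words out) := by unfold Spec_build_freqs_dicts; infer_instance

-- ===== CLAIM (what is proved, stated in full; the proofs are below) =====
def Claim_equal_build_freqs_dicts : Prop := ∀ (data : List (List (List (List String)))) (most_used_words : List String), Dom_build_freqs_dicts data most_used_words → Pre_build_freqs_dicts data most_used_words → Spec_build_freqs_dicts data most_used_words (build_freqs_dicts data most_used_words)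

-- ===== LEMMAS AND PROOFS =====

-- the full stream of adjacent pairs, in traversal order
def pvFlat (data : List (List (List (List String)))) : List (String × String) :=
  data.flatMap (fun x => (PySem.List.pyGetD x 0 []).flatMap
    (fun s => s.zip (PySem.List.slice s (some 1) none)))

-- per-occurrence keys contributed to d_g resp. d_d by one adjacent pair
def pvGK (muw : List String) (p : String × String) : List String :=
  if muw.contains p.1 then [p.1 ++ "|" ++ p.2] else []
def pvDK (muw : List String) (p : String × String) : List String :=
  if muw.contains p.2 then [p.1 ++ "|" ++ p.2] else []

-- weighted increment step: d[key] = d.get(key,0) + c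
def pvW (d : PySem.Dict String Int) (kc : String × Int) : PySem.Dict String Int :=
  d.insert kc.1 (d.getD kc.1 0 + kc.2)

-- intermediate form of A's per-pair state update (proved equal to A's positional loop below)
def pvStepB (muw : List String)
    (st : PySem.Dict String Int × PySem.Dict String Int) (p : String × String) :
    PySem.Dict String Int × PySem.Dict String Int :=
  let st1 := if muw.contains p.1 then (pvInc st.1 (p.1 ++ "|" ++ p.2), st.2) else st
  if muw.contains p.2 then (st1.1, pvInc st1.2 (p.1 ++ "|" ++ p.2)) else st1

theorem pvStepB_comp (muw : List String) (st : PySem.Dict String Int × PySem.Dict String Int)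
    (p : String × String) :
    pvStepB muw st p = ((pvGK muw p).foldl pvInc st.1, (pvDK muw p).foldl pvInc st.2) := by
  simp only [pvStepB, pvGK, pvDK]
  by_cases h1 : p.1 ∈ muw <;> by_cases h2 : p.2 ∈ muw <;> simp [h1, h2]

theorem pvFoldB (muw : List String) (ps : List (String × String))
    (st : PySem.Dict String Int × PySem.Dict String Int) :
    ps.foldl (pvStepB muw) st
      = ((ps.flatMap (pvGK muw)).foldl pvInc st.1, (ps.flatMap (pvDK muw)).foldl pvInc st.2) := by
  induction ps generalizing st with
  | nil => simp
  | cons p ps ih =>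
    simp only [List.foldl_cons, List.flatMap_cons, List.foldl_append]
    rw [ih, pvStepB_comp]

theorem pvStepA_comp (muw s : List String) (st : PySem.Dict String Int × PySem.Dict String Int)
    (m : Nat) (hm : m < s.length) :
    pvStepA muw s st (m : Int)
      = ((if s[m]?.getD "" ∈ muw ∧ m + 1 < s.length then
            pvInc st.1 (s[m]?.getD "" ++ "|" ++ s[m + 1]?.getD "") else st.1),
         (if s[m]?.getD "" ∈ muw ∧ 0 < m then
            pvInc st.2 (s[m - 1]?.getD "" ++ "|" ++ s[m]?.getD "") else st.2)) := by
  have e0 : PySem.List.pyGetD s (m : Int) "" = s[m]?.getD "" := by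
    rw [PySem.List.pyGetD_natCast, List.getD_eq_getElem?_getD]
  have e1 : PySem.List.pyGetD s ((m : Int) + 1) "" = s[m + 1]?.getD "" := by
    have h : ((m : Int) + 1) = ((m + 1 : Nat) : Int) := by push_cast; ring
    rw [h, PySem.List.pyGetD_natCast, List.getD_eq_getElem?_getD]
  have c1 : ((m : Int) < (s.length : Int) - 1) ↔ m + 1 < s.length := by omega
  have c2 : ((0 : Int) < (m : Int)) ↔ 0 < m := by omega
  simp only [pvStepA, e0, e1]
  by_cases hw : s[m]?.getD "" ∈ muw
  · rw [if_pos (by simpa using hw)]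
    by_cases hpm : 0 < m
    · have e2 : PySem.List.pyGetD s ((m : Int) - 1) "" = s[m - 1]?.getD "" := by
        have h : ((m : Int) - 1) = ((m - 1 : Nat) : Int) := by omega
        rw [h, PySem.List.pyGetD_natCast, List.getD_eq_getElem?_getD]
      rw [if_pos (c2.mpr hpm), e2]
      by_cases hq : m + 1 < s.length
      · rw [if_pos (c1.mpr hq)]; simp [hw, hpm, hq]
      · rw [if_neg (fun h => hq (c1.mp h))]; simp [hw, hpm, hq]
    · rw [if_neg (fun h => hpm (c2.mp h))]
      by_cases hq : m + 1 < s.length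
      · rw [if_pos (c1.mpr hq)]; simp [hw, hpm, hq]
      · rw [if_neg (fun h => hq (c1.mp h))]; simp [hw, hpm, hq]
  · rw [if_neg (by simpa using hw)]
    simp [hw]

theorem pvFoldA_take (muw s : List String) (st : PySem.Dict String Int × PySem.Dict String Int)
    (m : Nat) (hm : m ≤ s.length) :
    (PySem.List.pyRange 0 (m : Int) 1).foldl (pvStepA muw s) st
      = ((((s.zip s.tail).take m).flatMap (pvGK muw)).foldl pvInc st.1,
         (((s.zip s.tail).take (m - 1)).flatMap (pvDK muw)).foldl pvInc st.2) := by
  have hlenp : (s.zip s.tail).length = s.length - 1 := by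
    simp [List.length_zip, List.length_tail]
  induction m with
  | zero => simp [PySem.List.pyRange_one_eq_nil]
  | succ m ih =>
    have hm' : m < s.length := by omega
    have hcast : ((m + 1 : Nat) : Int) = (m : Int) + 1 := by push_cast; ring
    rw [hcast, PySem.List.pyRange_one_succ_right (by positivity), List.foldl_append,
      List.foldl_cons, List.foldl_nil, ih (by omega), pvStepA_comp muw s _ m hm']
    have hpair : ∀ k : Nat, k + 1 < s.length →
        (s.zip s.tail)[k]? = some (s[k]?.getD "", s[k + 1]?.getD "") := by
      intro k hk
      have h1 : k < (s.zip s.tail).length := by omega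
      rw [List.getElem?_eq_getElem h1]
      simp [List.getElem_zip, List.getElem_tail,
        List.getElem?_eq_getElem (show k < s.length by omega),
        List.getElem?_eq_getElem (show k + 1 < s.length by omega)]
    rw [Prod.mk.injEq]
    refine ⟨?_, ?_⟩
    · rw [List.take_add_one, List.flatMap_append, List.foldl_append]
      by_cases hq : m + 1 < s.length
      · rw [hpair m hq]
        by_cases hw : s[m]?.getD "" ∈ muw <;> simp [pvGK, hw, hq]
      · have hnone : (s.zip s.tail)[m]? = none := by rw [List.getElem?_eq_none]; omega
        simp [hnone, hq]
    · rcases Nat.eq_zero_or_pos m with h0 | hpos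
      · subst h0; simp
      · rw [show m + 1 - 1 = (m - 1) + 1 by omega, List.take_add_one, List.flatMap_append,
          List.foldl_append, hpair (m - 1) (by omega), show m - 1 + 1 = m by omega]
        by_cases hw : s[m]?.getD "" ∈ muw <;> simp [pvDK, hw, hpos]

theorem pvSentence_eq (muw s : List String) (st : PySem.Dict String Int × PySem.Dict String Int) :
    (PySem.List.pyRange 0 (s.length : Int) 1).foldl (pvStepA muw s) st
      = (s.zip (PySem.List.slice s (some 1) none)).foldl (pvStepB muw) st := by
  rw [PySem.List.slice_from_one, pvFoldB, pvFoldA_take muw s st s.length le_rfl]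
  have hlenp : (s.zip s.tail).length = s.length - 1 := by
    simp [List.length_zip, List.length_tail]
  rw [List.take_of_length_le (by omega), List.take_of_length_le (by omega)]

-- generic: the triple-nested fold over adjacent pairs is the fold over pvFlat
theorem pv_flatten_inner {δ : Type} (f : δ → (String × String) → δ)
    (ss : List (List String)) (init : δ) :
    ss.foldl (fun st s => (s.zip (PySem.List.slice s (some 1) none)).foldl f st) init
      = (ss.flatMap (fun s => s.zip (PySem.List.slice s (some 1) none))).foldl f init := by
  induction ss generalizing init with
  | nil => rfl
  | cons s ss ih => simp only [List.foldl_cons, List.flatMap_cons, List.foldl_append]; rw [ih]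

theorem pv_flatten {δ : Type} (f : δ → (String × String) → δ)
    (data : List (List (List (List String)))) (init : δ) :
    data.foldl (fun st x =>
        (PySem.List.pyGetD x 0 []).foldl (fun st s =>
          (s.zip (PySem.List.slice s (some 1) none)).foldl f st) st) init
      = (pvFlat data).foldl f init := by
  induction data generalizing init with
  | nil => rfl
  | cons x xs ih =>
    simp only [List.foldl_cons, pvFlat, List.flatMap_cons, List.foldl_append]
    rw [ih, pv_flatten_inner]
    rfl

-- A's whole nested loop in flat form
theorem pvA_flat (muw : List String) (data : List (List (List (List String)))) :
    build_freqs_dicts data muw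
      = ((((pvFlat data).flatMap (pvGK muw)).foldl pvInc PySem.Dict.empty).items,
         (((pvFlat data).flatMap (pvDK muw)).foldl pvInc PySem.Dict.empty).items) := by
  unfold build_freqs_dicts
  have h : ∀ (st : PySem.Dict String Int × PySem.Dict String Int),
      data.foldl (fun st x =>
        (PySem.List.pyGetD x 0 []).foldl (fun st sentence =>
          (PySem.List.pyRange 0 (sentence.length : Int) 1).foldl (pvStepA muw sentence) st) st) st
      = data.foldl (fun st x =>
        (PySem.List.pyGetD x 0 []).foldl (fun st s =>
          (s.zip (PySem.List.slice s (some 1) none)).foldl (pvStepB muw) st) st) st := by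
    intro st
    induction data generalizing st with
    | nil => rfl
    | cons x xs ih =>
      simp only [List.foldl_cons]
      rw [← ih]
      congr 1
      generalize PySem.List.pyGetD x 0 [] = ss
      induction ss generalizing st with
      | nil => rfl
      | cons s ss ih2 => simp only [List.foldl_cons]; rw [pvSentence_eq, ih2]
  rw [h, pv_flatten (pvStepB muw), pvFoldB]

-- inserting at a key already present commutes with inserting at a different key
theorem pv_insert_comm (d : PySem.Dict String Int) (k k' : String) (v w : Int)
    (hmem : k ∈ d.keys) (hne : k' ≠ k) :
    (d.insert k v).insert k' w = (d.insert k' w).insert k v := by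
  have hck : d.contains k = true := (PySem.Dict.contains_iff_mem_keys d k).mpr hmem
  apply PySem.Dict.ext
  by_cases hck' : d.contains k' = true
  · rw [PySem.Dict.items_insert_of_contains _ w (by
        rw [PySem.Dict.contains_insert]; simp [hck']),
      PySem.Dict.items_insert_of_contains d v hck,
      PySem.Dict.items_insert_of_contains _ v (by
        rw [PySem.Dict.contains_insert]; simp [hck]),
      PySem.Dict.items_insert_of_contains d w hck']
    simp only [List.map_map]
    apply List.map_congr_left
    intro p _
    simp only [Function.comp_apply]
    by_cases h1 : p.1 = k
    · simp [h1, Ne.symm hne]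
    · by_cases h2 : p.1 = k' <;> simp [h1, h2, hne]
  · have hck'2 : d.contains k' = false := by simpa using hck'
    rw [PySem.Dict.items_insert_of_not_contains _ w (by
        rw [PySem.Dict.contains_insert]; simp [hck'2, hne]),
      PySem.Dict.items_insert_of_contains d v hck,
      PySem.Dict.items_insert_of_contains _ v (by
        rw [PySem.Dict.contains_insert]; simp [hck]),
      PySem.Dict.items_insert_of_not_contains d w hck'2]
    rw [List.map_append]
    simp [hne]

-- a pending +1 at an existing key commutes through the weighted fold
theorem pv_comm (pl : List (String × Int)) (d : PySem.Dict String Int) (k : String)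
    (hmem : k ∈ d.keys) :
    pl.foldl pvW (pvInc d k) = pvInc (pl.foldl pvW d) k := by
  induction pl generalizing d with
  | nil => rfl
  | cons kc pl ih =>
    simp only [List.foldl_cons]
    by_cases hk : kc.1 = k
    · have hstep : pvW (pvInc d k) kc = pvInc (pvW d kc) k := by
        simp only [pvW, pvInc, hk, PySem.Dict.getD_insert_self, PySem.Dict.insert_insert_self]
        congr 1
        ring
      rw [hstep, ih _ (by simp [pvW, PySem.Dict.mem_keys_insert, hk])]
    · have hstep : pvW (pvInc d k) kc = pvInc (pvW d kc) k := by
        simp only [pvW, pvInc, PySem.Dict.getD_insert_of_ne d _ _ hk,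
          PySem.Dict.getD_insert_of_ne d _ _ (Ne.symm hk)]
        exact pv_insert_comm d k kc.1 _ _ hmem hk
      rw [hstep, ih _ (by simp [pvW, PySem.Dict.mem_keys_insert, Or.inr hmem])]

-- bumping one weight in the middle equals one extra increment at the end
theorem pv_bump (pl₁ pl₂ : List (String × Int)) (k : String) (c : Int)
    (d : PySem.Dict String Int) :
    (pl₁ ++ (k, c + 1) :: pl₂).foldl pvW d = pvInc ((pl₁ ++ (k, c) :: pl₂).foldl pvW d) k := by
  rw [List.foldl_append, List.foldl_append, List.foldl_cons, List.foldl_cons]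
  set d0 := pl₁.foldl pvW d
  have h1 : pvW d0 (k, c + 1) = pvInc (pvW d0 (k, c)) k := by
    simp only [pvW, pvInc, PySem.Dict.getD_insert_self, PySem.Dict.insert_insert_self]
    congr 1
    ring
  rw [h1, pv_comm _ _ _ (by simp [pvW, PySem.Dict.mem_keys_insert])]

theorem pv_flatMap_congr {α β : Type} (l : List α) (f g : α → List β)
    (h : ∀ a ∈ l, f a = g a) : l.flatMap f = l.flatMap g := by
  induction l with
  | nil => rfl
  | cons a l ih =>
    simp only [List.flatMap_cons]
    rw [h a (List.mem_cons_self), ih (fun a ha => h a (List.mem_cons_of_mem _ ha))]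

-- THE CORE LEMMA: per-occurrence unit increments = grouped weighted increments over first occurrences
theorem pv_main (c : (String × String) → Bool) (k : (String × String) → String)
    (P : List (String × String)) :
    ((PySem.Set.ofList P).flatMap (fun p => if c p then [(k p, (P.count p : Int))] else [])).foldl
        pvW PySem.Dict.empty
      = (P.flatMap (fun p => if c p then [k p] else [])).foldl pvInc PySem.Dict.empty := by
  induction P using List.reverseRecOn with
  | nil => rfl
  | append_singleton P p ih =>
    rw [List.flatMap_append, List.foldl_append, PySem.Set.ofList_append_singleton]
    by_cases hp : p ∈ P
    · have hadd : (PySem.Set.ofList P).add p = PySem.Set.ofList P := by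
        simp [PySem.Set.add, PySem.Set.contains, (PySem.Set.mem_ofList P p).mpr hp]
      rw [hadd]
      obtain ⟨Q₁, Q₂, hsplit⟩ := List.append_of_mem ((PySem.Set.mem_ofList P p).mpr hp)
      have hnd := PySem.Set.nodup_ofList P
      rw [hsplit] at hnd
      obtain ⟨hnd1, hnd2, hdisj⟩ := List.nodup_append.mp hnd
      have hQ2 : p ∉ Q₂ := (List.nodup_cons.mp hnd2).1
      have hp1 : p ∉ Q₁ := fun h => hdisj p h p List.mem_cons_self rfl
      have hcnt_mem : ∀ Q : List (String × String), p ∉ Q →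
          Q.flatMap (fun q => if c q then [(k q, ((P ++ [p]).count q : Int))] else [])
            = Q.flatMap (fun q => if c q then [(k q, (P.count q : Int))] else []) := by
        intro Q hpQ
        apply pv_flatMap_congr
        intro q hq
        have hqp : q ≠ p := fun h => hpQ (h ▸ hq)
        rw [List.count_append]
        simp [Ne.symm hqp]
      have hcp : ((P ++ [p]).count p : Int) = (P.count p : Int) + 1 := by
        rw [List.count_append]
        simp
      rw [hsplit, List.flatMap_append, List.flatMap_cons,
        hcnt_mem Q₁ hp1, hcnt_mem Q₂ hQ2]
      have hA : (Q₁.flatMap (fun q => if c q then [(k q, (P.count q : Int))] else [])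
            ++ ((if c p then [(k p, (P.count p : Int))] else [])
              ++ Q₂.flatMap (fun q => if c q then [(k q, (P.count q : Int))] else [])))
          = (PySem.Set.ofList P).flatMap (fun q => if c q then [(k q, (P.count q : Int))] else []) := by
        rw [hsplit, List.flatMap_append, List.flatMap_cons]
      by_cases hc : c p
      · rw [if_pos hc, hcp, List.singleton_append, pv_bump]
        rw [if_pos hc, List.singleton_append] at hA
        rw [hA, ih]
        simp [hc, pvInc]
      · rw [if_neg hc, List.nil_append]
        rw [if_neg hc, List.nil_append] at hA
        rw [hA, ih]
        simp [hc]
    · have hpo : p ∉ PySem.Set.ofList P := fun h => hp ((PySem.Set.mem_ofList P p).mp h)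
      have hadd : (PySem.Set.ofList P).add p = PySem.Set.ofList P ++ [p] := by
        simp [PySem.Set.add, PySem.Set.contains, hpo]
      have hcnt_mem : (PySem.Set.ofList P).flatMap
            (fun q => if c q then [(k q, ((P ++ [p]).count q : Int))] else [])
          = (PySem.Set.ofList P).flatMap
            (fun q => if c q then [(k q, (P.count q : Int))] else []) := by
        apply pv_flatMap_congr
        intro q hq
        have hqp : q ≠ p := fun h => hp (h ▸ (PySem.Set.mem_ofList P q).mp hq)
        rw [List.count_append]
        simp [Ne.symm hqp]
      have hcp : ((P ++ [p]).count p : Int) = 1 := by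
        rw [List.count_append, List.count_eq_zero.mpr hp]
        simp
      rw [hadd, List.flatMap_append, List.foldl_append, hcnt_mem, ih,
        List.flatMap_cons, List.flatMap_nil, List.append_nil, hcp]
      by_cases hc : c p <;> simp [hc, pvW, pvInc]

-- the weighted keys contributed to d_g resp. d_d by one aggregated item
def pvGKW (muw : List String) (pc : (String × String) × Int) : List (String × Int) :=
  if muw.contains pc.1.1 then [(pc.1.1 ++ "|" ++ pc.1.2, pc.2)] else []
def pvDKW (muw : List String) (pc : (String × String) × Int) : List (String × Int) :=
  if muw.contains pc.1.2 then [(pc.1.1 ++ "|" ++ pc.1.2, pc.2)] else []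

theorem pv_set_contains (xs : List String) (y : String) :
    PySem.Set.contains (PySem.Set.ofList xs) y = xs.contains y := by
  simp [PySem.Set.contains, PySem.Set.mem_ofList]

theorem pvStepC_comp (muw : List String) (st : PySem.Dict String Int × PySem.Dict String Int)
    (pc : (String × String) × Int) :
    pvStepC (PySem.Set.ofList muw) st pc
      = ((pvGKW muw pc).foldl pvW st.1, (pvDKW muw pc).foldl pvW st.2) := by
  simp only [pvStepC, pvGKW, pvDKW, pv_set_contains]
  by_cases h1 : pc.1.1 ∈ muw <;> by_cases h2 : pc.1.2 ∈ muw <;> simp [h1, h2, pvW]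

theorem pvFoldC (muw : List String) (pcs : List ((String × String) × Int))
    (st : PySem.Dict String Int × PySem.Dict String Int) :
    pcs.foldl (pvStepC (PySem.Set.ofList muw)) st
      = ((pcs.flatMap (pvGKW muw)).foldl pvW st.1, (pcs.flatMap (pvDKW muw)).foldl pvW st.2) := by
  induction pcs generalizing st with
  | nil => simp
  | cons pc pcs ih =>
    simp only [List.foldl_cons, List.flatMap_cons, List.foldl_append]
    rw [ih, pvStepC_comp]

-- B's whole computation in grouped flat form
theorem pvB_flat (muw : List String) (data : List (List (List (List String)))) :
    build_freqs_dicts_alt data muw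
      = ((((PySem.Set.ofList (pvFlat data)).flatMap (fun p =>
              if muw.contains p.1 then [(p.1 ++ "|" ++ p.2, ((pvFlat data).count p : Int))] else [])).foldl
            pvW PySem.Dict.empty).items,
         (((PySem.Set.ofList (pvFlat data)).flatMap (fun p =>
              if muw.contains p.2 then [(p.1 ++ "|" ++ p.2, ((pvFlat data).count p : Int))] else [])).foldl
            pvW PySem.Dict.empty).items) := by
  unfold build_freqs_dicts_alt
  rw [pv_flatten (δ := PySem.Dict (String × String) Int)
      (fun pairs p => pairs.insert p (pairs.getD p 0 + 1)),
    PySem.Dict.foldl_insert_getD_add_one_eq_counter]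
  simp only [pvFoldC, PySem.Dict.items_counter, List.flatMap_map, pvGKW, pvDKW]

-- ===== VERDICT (by name: the statement is the Claim_ definition above) =====
theorem build_freqs_dicts_spec : Claim_equal_build_freqs_dicts := by
  intro data muw _ _
  unfold Spec_build_freqs_dicts
  rw [pvA_flat, pvB_flat,
    pv_main (fun p => muw.contains p.1) (fun p => p.1 ++ "|" ++ p.2) (pvFlat data),
    pv_main (fun p => muw.contains p.2) (fun p => p.1 ++ "|" ++ p.2) (pvFlat data)]
  rfl
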